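-- pv_equiv track=rewrite | github.com/Eargosha/TLSViewer | app/core/log_parser.py | filter_tls_lines
-- ===== SOURCE A (Python) =====
-- def filter_tls_lines(lines):
--     """
--     Фильтрует входные строки, оставляя только те,
--     которые принадлежат TLS-записям.
--     """
--     tls_lines = []
--     in_tls_block = False
--
--     for line in lines:
--         line = line.rstrip('\n')
--         stripped_line = line.strip()
--
--         # Начинается TLS-запись
--         if stripped_line.startswith("TLSv1"):
--             in_tls_block = True
--
--         # Если внутри TLS-блока и строка не пустая — сохраняем
--         if in_tls_block and stripped_line != "":
--             tls_lines.append(line)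
--
--     return tls_lines
-- ===== SOURCE B (Python) =====
-- def filter_tls_lines(lines):
--     # Single reverse pass, building the result back-to-front: walk the lines
--     # from the end, collect non-blank lines of the current suffix in `buf`
--     # (reverse order), and whenever a "TLSv1" marker line is met, record how
--     # many collected lines belong to the answer. The last marker seen in
--     # reverse order is the first marker in forward order, so `keep` ends up
--     # describing exactly the non-blank lines from the first marker onward.
--     buf = []   # non-blank rstripped lines of the suffix, in reverse order
--     keep = 0   # how many entries of buf form the answer
--     for line in reversed(list(lines)):
--         line = line.rstrip('\n')
--         s = line.strip()
--         if s != "":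
--             buf.append(line)
--             if s.startswith("TLSv1"):
--                 keep = len(buf)
--     return buf[:keep][::-1]
-- ===== Notes on version B (the rewrite author's own statement) =====
-- stated objective: alternative
-- what changed: Replaces A's forward pass with a latch flag by a single reverse pass that builds the output back-to-front: it accumulates the non-blank lines of the suffix and, at each marker line, records how many of them form the answer (the last marker seen in reverse is the first forward).
import Mathlib
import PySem

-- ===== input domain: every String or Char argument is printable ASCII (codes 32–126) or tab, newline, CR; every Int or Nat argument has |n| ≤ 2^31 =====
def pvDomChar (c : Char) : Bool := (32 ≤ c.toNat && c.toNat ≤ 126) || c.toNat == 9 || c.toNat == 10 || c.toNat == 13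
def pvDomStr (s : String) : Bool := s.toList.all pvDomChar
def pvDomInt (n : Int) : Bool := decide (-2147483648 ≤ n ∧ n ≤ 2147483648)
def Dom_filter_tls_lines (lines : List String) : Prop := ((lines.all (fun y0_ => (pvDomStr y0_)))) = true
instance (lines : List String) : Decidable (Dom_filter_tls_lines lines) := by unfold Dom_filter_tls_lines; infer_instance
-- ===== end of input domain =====

-- B replaces A's forward latch-flag pass by a single reverse pass building the output back-to-front; objective: alternative.

-- s.rstrip('\n'): drop trailing newline characters (exact; PySem has no chars-argument rstrip)
def pvRstripNL (s : String) : String := String.ofList ((s.toList.reverse.dropWhile (· == '\n')).reverse)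

-- ===== PORT A =====
def filter_tls_lines (lines : List String) : List String :=
  (lines.foldl (fun (st : List String × Bool) line =>
      let l := pvRstripNL line
      let stripped := PySem.Str.strip l
      let inBlock := st.2 || PySem.Str.startswith stripped "TLSv1"
      (if inBlock && stripped != "" then st.1 ++ [l] else st.1, inBlock))
    ([], false)).1

-- ===== PORT B =====
def filter_tls_lines_alt (lines : List String) : List String :=
  let st := (lines.reverse).foldl (fun (st : List String × Nat) line =>
      let l := pvRstripNL line
      let s := PySem.Str.strip l
      if s != "" then
        let buf := st.1 ++ [l]
        (buf, if PySem.Str.startswith s "TLSv1" then buf.length else st.2)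
      else st) ([], 0)
  (st.1.take st.2).reverse

-- ===== PRECONDITION & SPEC =====
def Spec_filter_tls_lines (lines : List String) (out : List String) : Prop := out = filter_tls_lines_alt lines
instance (lines : List String) (out : List String) : Decidable (Spec_filter_tls_lines lines out) := by unfold Spec_filter_tls_lines; infer_instance

-- ===== CLAIM (what is proved, stated in full; the proofs are below) =====
def Claim_equal_filter_tls_lines : Prop := ∀ (lines : List String), Dom_filter_tls_lines lines → Spec_filter_tls_lines lines (filter_tls_lines lines)

-- ===== LEMMAS AND PROOFS =====

-- shorthands for the two per-line tests and the kept value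
def pvBlank (ln : String) : Bool := PySem.Str.strip (pvRstripNL ln) == ""
def pvMark (ln : String) : Bool := PySem.Str.startswith (PySem.Str.strip (pvRstripNL ln)) "TLSv1"

-- the common specification both ports are reduced to
def pvSpec (lines : List String) : List String :=
  match lines.findIdx? pvMark with
  | none => []
  | some i => ((lines.drop i).filter (fun ln => !pvBlank ln)).map pvRstripNL

-- A's loop body, named for the lemmas
def pvStepA (st : List String × Bool) (line : String) : List String × Bool :=
  let l := pvRstripNL line
  let stripped := PySem.Str.strip l
  let inBlock := st.2 || PySem.Str.startswith stripped "TLSv1"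
  (if inBlock && stripped != "" then st.1 ++ [l] else st.1, inBlock)

-- B's loop body, named for the lemmas
def pvStepB (st : List String × Nat) (line : String) : List String × Nat :=
  let l := pvRstripNL line
  let s := PySem.Str.strip l
  if s != "" then
    let buf := st.1 ++ [l]
    (buf, if PySem.Str.startswith s "TLSv1" then buf.length else st.2)
  else st

theorem pv_mark_not_blank {ln : String} (h : pvMark ln = true) : pvBlank ln = false := by
  unfold pvMark at h
  unfold pvBlank
  by_contra hb
  simp at hb
  rw [hb] at h
  simp [PySem.Str.startswith] at h
  exact absurd h (by decide)

-- ===== A = pvSpec =====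

theorem pv_foldlA_true (lines : List String) (acc : List String) :
    lines.foldl pvStepA (acc, true)
      = (acc ++ (lines.filter (fun ln => !pvBlank ln)).map pvRstripNL, true) := by
  induction lines generalizing acc with
  | nil => simp
  | cons ln rest ih =>
    simp only [List.foldl_cons, pvStepA, Bool.true_or, Bool.true_and, List.filter_cons]
    by_cases h : pvBlank ln = true
    · unfold pvBlank at h
      simp at h
      simp [h, ih, pvBlank]
    · have h' : PySem.Str.strip (pvRstripNL ln) ≠ "" := by
        unfold pvBlank at h; simpa using h
      simp [h', ih, h]

theorem pv_A_spec (lines : List String) :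
    (lines.foldl pvStepA ([], false)).1 = pvSpec lines := by
  induction lines with
  | nil => simp [pvSpec]
  | cons ln rest ih =>
    simp only [List.foldl_cons, pvStepA, Bool.false_or]
    by_cases hp : pvMark ln = true
    · have hq : PySem.Str.strip (pvRstripNL ln) ≠ "" := by
        have := pv_mark_not_blank hp
        unfold pvBlank at this
        simpa using this
      have hp' : PySem.Str.startswith (PySem.Str.strip (pvRstripNL ln)) "TLSv1" = true := hp
      simp only [pvSpec, List.findIdx?_cons, hp, hp']
      rw [pv_foldlA_true]
      simp [hq, pvBlank]
    · rw [Bool.not_eq_true] at hp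
      have hp' : PySem.Str.startswith (PySem.Str.strip (pvRstripNL ln)) "TLSv1" = false := hp
      simp only [hp', Bool.false_and, Bool.false_eq_true, if_false]
      rw [ih]
      simp only [pvSpec, List.findIdx?_cons, hp, Bool.false_eq_true, if_false]
      cases rest.findIdx? pvMark with
      | none => simp
      | some i => simp

-- ===== B = pvSpec =====

-- pvSpec lines is a suffix of the full filtered/rstripped list
theorem pv_spec_suffix (lines : List String) :
    ∃ pre, (lines.filter (fun ln => !pvBlank ln)).map pvRstripNL = pre ++ pvSpec lines := by
  unfold pvSpec
  cases h : lines.findIdx? pvMark with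
  | none => exact ⟨(lines.filter (fun ln => !pvBlank ln)).map pvRstripNL, by simp⟩
  | some i =>
    refine ⟨((lines.take i).filter (fun ln => !pvBlank ln)).map pvRstripNL, ?_⟩
    rw [← List.map_append, ← List.filter_append, List.take_append_drop]

-- characterization of B's fold (as a foldr, i.e. reverse traversal)
theorem pv_foldrB (lines : List String) :
    lines.foldr (fun x st => pvStepB st x) ([], 0)
      = (((lines.filter (fun ln => !pvBlank ln)).map pvRstripNL).reverse, (pvSpec lines).length) := by
  induction lines with
  | nil => simp [pvSpec]
  | cons ln rest ih =>
    rw [List.foldr_cons, ih]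
    simp only [pvStepB, List.filter_cons]
    by_cases hb : pvBlank ln = true
    · have hs : PySem.Str.strip (pvRstripNL ln) = "" := by
        unfold pvBlank at hb; simpa using hb
      have hm : pvMark ln = false := by
        by_contra h
        simp at h
        rw [pv_mark_not_blank h] at hb
        exact absurd hb (by decide)
      have hspec : pvSpec (ln :: rest) = pvSpec rest := by
        unfold pvSpec
        simp only [List.findIdx?_cons, hm, Bool.false_eq_true, if_false]
        cases rest.findIdx? pvMark with
        | none => simp
        | some i => simp
      rw [hspec]
      simp [hs, hb]
    · have hs : PySem.Str.strip (pvRstripNL ln) ≠ "" := by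
        unfold pvBlank at hb; simpa using hb
      have hbf : pvBlank ln = false := by simpa using hb
      simp only [if_pos (by simpa using hs : (PySem.Str.strip (pvRstripNL ln) != "") = true)]
      by_cases hm : pvMark ln = true
      · have hm' : PySem.Str.startswith (PySem.Str.strip (pvRstripNL ln)) "TLSv1" = true := hm
        have hspec : pvSpec (ln :: rest) = ((ln :: rest).filter (fun l => !pvBlank l)).map pvRstripNL := by
          unfold pvSpec
          simp [List.findIdx?_cons, hm]
        rw [hm', hspec]
        simp [hbf]
      · rw [Bool.not_eq_true] at hm
        have hm' : PySem.Str.startswith (PySem.Str.strip (pvRstripNL ln)) "TLSv1" = false := hm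
        have hspec : pvSpec (ln :: rest) = pvSpec rest := by
          unfold pvSpec
          simp only [List.findIdx?_cons, hm, Bool.false_eq_true, if_false]
          cases rest.findIdx? pvMark with
          | none => simp
          | some i => simp
        rw [hm', hspec]
        simp [hbf]

theorem pv_B_spec (lines : List String) : filter_tls_lines_alt lines = pvSpec lines := by
  unfold filter_tls_lines_alt
  have hfold : (lines.reverse).foldl (fun (st : List String × Nat) line =>
      let l := pvRstripNL line
      let s := PySem.Str.strip l
      if s != "" then
        let buf := st.1 ++ [l]
        (buf, if PySem.Str.startswith s "TLSv1" then buf.length else st.2)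
      else st) ([], 0) = lines.foldr (fun x st => pvStepB st x) ([], 0) := by
    rw [List.foldl_reverse]
    rfl
  rw [hfold, pv_foldrB]
  obtain ⟨pre, hpre⟩ := pv_spec_suffix lines
  simp only [hpre]
  rw [List.reverse_append, List.take_append_of_le_length (by simp),
      List.take_of_length_le (by simp), List.reverse_reverse]

-- ===== VERDICT (by name: the statement is the Claim_ definition above) =====
theorem filter_tls_lines_spec : Claim_equal_filter_tls_lines := by
  intro lines _
  unfold Spec_filter_tls_lines
  rw [pv_B_spec]
  exact pv_A_spec lines
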